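-- pv_equiv track=rewrite | github.com/morenzoe/Tugas-Besar-IF1210-Dasar-Pemrograman-2021 | TBIF1210-02-10/load.py | semicolon_split
-- ===== SOURCE A (Python) =====
-- def semicolon_split(row):
--     """Fungsi ini membaca string dan menghasilkan list of string tiap
--     kata antara titik koma (semicolon). Fungsi kemudian mengembalikan
--     list tesebut.
--
--     Ide algoritma dari documentation fungsi bawaan Python split().
--     """
--
--     # KAMUS LOKAL
--     # Variabel
--     # array_word : array of str
--     # row : str
--     # i, j : int
--
--     # ALGORITMA
--     # Inisialisasi variabel array dan counter
--     array_word = []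
--     i = j = 0
--
--     # Loop untuk seluruh karakter dalam row
--     while True:
--         # Melongkapi semicolon ketika belum mencapai karakter terakhir
--         while i < len(row) and row[i] == ';':
--             i += 1
--
--         # Seluruh karakter sudah di proses
--         if i == len(row):
--             break
--
--         # Menangani kasus ada karakter selain semicolon
--         j = i
--         i += 1
--         while i < len(row) and row[i] != ';':
--             i += 1
--
--         # Menangani kasus tidak ada semicolon dalam row
--         if j == 0 and i == len(
--                 row) and ';' not in row:
--             return [row]
--
--         # Menambahkan data antara semicolon sebagai string
--         array_word.append(row[j:i])
--     return array_word
-- ===== SOURCE B (Python) =====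
-- def semicolon_split(row):
--     return [tok for tok in row.split(';') if tok != '']
-- ===== Notes on version B (the rewrite author's own statement) =====
-- stated objective: simpler
-- what changed: Replaces A's manual two-pointer index scan over the characters (with its special-case early return for rows without semicolons) by a single library split on the separator followed by filtering out the empty tokens.
import Mathlib
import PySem

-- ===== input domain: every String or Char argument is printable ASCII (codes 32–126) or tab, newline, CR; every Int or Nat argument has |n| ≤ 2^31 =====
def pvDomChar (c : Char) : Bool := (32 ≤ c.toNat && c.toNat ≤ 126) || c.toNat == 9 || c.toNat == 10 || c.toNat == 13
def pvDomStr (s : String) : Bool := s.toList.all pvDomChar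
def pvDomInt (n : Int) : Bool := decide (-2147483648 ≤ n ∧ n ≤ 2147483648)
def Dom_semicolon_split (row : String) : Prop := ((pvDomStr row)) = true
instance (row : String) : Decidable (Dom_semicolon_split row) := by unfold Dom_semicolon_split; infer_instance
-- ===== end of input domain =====

-- B replaces A's manual two-pointer index scan (with its special-case early return for
-- rows without semicolons) by a library split on ';' plus a filter of the empty tokens: simpler.

-- ===== PORT A =====
-- inner while loop `while i < len(row) and row[i] == ';': i += 1`
def pvSkipA (cs : List Char) (i : Nat) : Nat :=
  if h : i < cs.length then
    if cs[i] = ';' then pvSkipA cs (i + 1) else i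
  else i
termination_by cs.length - i

-- inner while loop `while i < len(row) and row[i] != ';': i += 1`
def pvScanA (cs : List Char) (i : Nat) : Nat :=
  if h : i < cs.length then
    if cs[i] ≠ ';' then pvScanA cs (i + 1) else i
  else i
termination_by cs.length - i

theorem pvSkipA_ge (cs : List Char) (i : Nat) : i ≤ pvSkipA cs i := by
  unfold pvSkipA
  split
  · split
    · exact le_trans (Nat.le_succ i) (pvSkipA_ge cs (i + 1))
    · exact le_refl i
  · exact le_refl i
termination_by cs.length - i

theorem pvScanA_ge (cs : List Char) (i : Nat) : i ≤ pvScanA cs i := by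
  unfold pvScanA
  split
  · split
    · exact le_trans (Nat.le_succ i) (pvScanA_ge cs (i + 1))
    · exact le_refl i
  · exact le_refl i
termination_by cs.length - i

theorem pvSkipA_le (cs : List Char) (i : Nat) (h : i ≤ cs.length) : pvSkipA cs i ≤ cs.length := by
  unfold pvSkipA
  split
  · split
    · exact pvSkipA_le cs (i + 1) (by omega)
    · exact h
  · exact h
termination_by cs.length - i

theorem pvScanA_le (cs : List Char) (i : Nat) (h : i ≤ cs.length) : pvScanA cs i ≤ cs.length := by
  unfold pvScanA
  split
  · split
    · exact pvScanA_le cs (i + 1) (by omega)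
    · exact h
  · exact h
termination_by cs.length - i

-- outer `while True` loop of A; i and j are the two cursors, acc is array_word
-- (hi is only a termination invariant; the entry point passes 0 ≤ length)
def pvLoopA (cs : List Char) (i : Nat) (hi : i ≤ cs.length) (acc : List String) : List String :=
  let i' := pvSkipA cs i                                   -- skip semicolons
  if _h : i' = cs.length then acc                          -- all characters processed
  else
    have h1 : i' ≤ cs.length := pvSkipA_le cs i hi
    let j := i'
    let i2 := pvScanA cs (i' + 1)                          -- scan the word
    have h2 : i2 ≤ cs.length := pvScanA_le cs (i' + 1) (by omega)
    if j = 0 ∧ i2 = cs.length ∧ ¬ (';' ∈ cs) then          -- `';' not in row` (single-char needle: exact as membership)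
      [String.ofList cs]                                   -- `return [row]`
    else
      pvLoopA cs i2 h2 (acc ++ [String.ofList ((cs.drop j).take (i2 - j))])  -- append row[j:i]
termination_by cs.length - i
decreasing_by
  have hg1 := pvSkipA_ge cs i
  have hg2 := pvScanA_ge cs (pvSkipA cs i + 1)
  omega

def semicolon_split (row : String) : List String :=
  pvLoopA row.toList 0 (by omega) []

-- ===== PORT B =====
-- `[tok for tok in row.split(';') if tok != '']`
def semicolon_split_alt (row : String) : List String :=
  ((PySem.Chars.splitOn row.toList ";".toList).map String.ofList).filter (fun tok => tok ≠ "")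

-- ===== PRECONDITION & SPEC =====
def Spec_semicolon_split (row : String) (out : List String) : Prop := out = semicolon_split_alt row
instance (row : String) (out : List String) : Decidable (Spec_semicolon_split row out) := by unfold Spec_semicolon_split; infer_instance

-- ===== CLAIM (what is proved, stated in full; the proofs are below) =====
def Claim_equal_semicolon_split : Prop := ∀ (row : String), Dom_semicolon_split row → Spec_semicolon_split row (semicolon_split row)

-- ===== LEMMAS AND PROOFS =====

-- a common reference point: the list of non-empty maximal ';'-free chunks
def pvTokens : List Char → List String
  | [] => []
  | c :: rest =>
    if c = ';' then pvTokens rest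
    else String.ofList (c :: rest.takeWhile (fun d => d ≠ ';')) :: pvTokens (rest.dropWhile (fun d => d ≠ ';'))
termination_by l => l.length
decreasing_by
  · simp only [List.length_cons]; omega
  · have h := List.length_dropWhile_le (fun d => decide (d ≠ ';')) rest
    simp only [List.length_cons]; omega

-- pvTokens ignores leading semicolons
theorem pvTokens_dropSemis (l : List Char) :
    pvTokens (l.dropWhile (fun c => c = ';')) = pvTokens l := by
  induction l with
  | nil => rfl
  | cons c rest ih =>
    by_cases hc : c = ';'
    · rw [List.dropWhile_cons_of_pos (by simp [hc]), ih, pvTokens]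
      simp [hc]
    · rw [List.dropWhile_cons_of_neg (by simp [hc])]

-- one word step of pvTokens
theorem pvTokens_unfold (l : List Char) :
    pvTokens l =
      (if l.takeWhile (fun d => d ≠ ';') = [] then []
       else [String.ofList (l.takeWhile (fun d => d ≠ ';'))]) ++
      pvTokens (l.dropWhile (fun d => d ≠ ';')) := by
  cases l with
  | nil => rfl
  | cons c rest =>
    by_cases hc : c = ';'
    · rw [List.takeWhile_cons_of_neg (by simp [hc]), List.dropWhile_cons_of_neg (by simp [hc])]
      subst hc
      rw [pvTokens]
      simp
    · rw [List.takeWhile_cons_of_pos (by simp [hc]), List.dropWhile_cons_of_pos (by simp [hc])]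
      rw [pvTokens]
      simp [hc]

-- ---- characterisation of A's two inner loops ----

theorem pvSkipA_drop (cs : List Char) (i : Nat) (h : i ≤ cs.length) :
    cs.drop (pvSkipA cs i) = (cs.drop i).dropWhile (fun c => c = ';') := by
  rw [pvSkipA]
  split
  · rename_i hlt
    rw [List.drop_eq_getElem_cons hlt]
    split
    · rename_i hc
      rw [List.dropWhile_cons_of_pos (by simp [hc])]
      exact pvSkipA_drop cs (i + 1) (by omega)
    · rename_i hc
      rw [List.dropWhile_cons_of_neg (by simp [hc]), ← List.drop_eq_getElem_cons hlt]
  · rename_i hge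
    have : i = cs.length := by omega
    subst this
    simp
termination_by cs.length - i

theorem pvSkipA_stop (cs : List Char) (i : Nat) (h1 : i ≤ cs.length) :
    cs[pvSkipA cs i]? ≠ some ';' := by
  rw [pvSkipA]
  split
  · rename_i hlt
    split
    · exact pvSkipA_stop cs (i + 1) (by omega)
    · rename_i hc
      rw [List.getElem?_eq_getElem hlt]
      simpa using hc
  · rename_i hge
    rw [List.getElem?_eq_none (by omega)]
    simp
termination_by cs.length - i

theorem pvScanA_drop (cs : List Char) (i : Nat) (h : i ≤ cs.length) :
    cs.drop (pvScanA cs i) = (cs.drop i).dropWhile (fun c => c ≠ ';') := by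
  rw [pvScanA]
  split
  · rename_i hlt
    rw [List.drop_eq_getElem_cons hlt]
    split
    · rename_i hc
      rw [List.dropWhile_cons_of_pos (by simpa using hc)]
      exact pvScanA_drop cs (i + 1) (by omega)
    · rename_i hc
      rw [List.dropWhile_cons_of_neg (by simpa using hc), ← List.drop_eq_getElem_cons hlt]
  · rename_i hge
    have : i = cs.length := by omega
    subst this
    simp
termination_by cs.length - i

theorem pvScanA_take (cs : List Char) (i : Nat) (h : i ≤ cs.length) :
    (cs.drop i).take (pvScanA cs i - i) = (cs.drop i).takeWhile (fun c => c ≠ ';') := by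
  rw [pvScanA]
  split
  · rename_i hlt
    rw [List.drop_eq_getElem_cons hlt]
    split
    · rename_i hc
      rw [List.takeWhile_cons_of_pos (by simpa using hc)]
      have hge := pvScanA_ge cs (i + 1)
      have hsub : pvScanA cs (i + 1) - i = (pvScanA cs (i + 1) - (i + 1)) + 1 := by omega
      rw [hsub, List.take_succ_cons]
      rw [pvScanA_take cs (i + 1) (by omega)]
    · rename_i hc
      rw [List.takeWhile_cons_of_neg (by simpa using hc)]
      simp
  · rename_i hge
    have : i = cs.length := by omega
    subst this
    simp
termination_by cs.length - i

-- ---- A's outer loop computes pvTokens ----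

theorem pvLoopA_eq (cs : List Char) (i : Nat) (hi : i ≤ cs.length) (acc : List String)
    (hacc : i = 0 → acc = []) : pvLoopA cs i hi acc = acc ++ pvTokens (cs.drop i) := by
  rw [pvLoopA]
  split
  · rename_i h
    have hnil : pvTokens (cs.drop i) = [] := by
      rw [← pvTokens_dropSemis (cs.drop i), ← pvSkipA_drop cs i hi, h]
      simp [pvTokens]
    simp [hnil]
  · rename_i h
    have hle : pvSkipA cs i ≤ cs.length := pvSkipA_le cs i hi
    have hlt : pvSkipA cs i < cs.length := by omega
    have hge : i ≤ pvSkipA cs i := pvSkipA_ge cs i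
    have hchar : ¬ (cs[pvSkipA cs i]'hlt = ';') := by
      have := pvSkipA_stop cs i hi
      rw [List.getElem?_eq_getElem hlt] at this
      simpa using this
    have hdrop : cs.drop (pvSkipA cs i) = cs[pvSkipA cs i]'hlt :: cs.drop (pvSkipA cs i + 1) :=
      List.drop_eq_getElem_cons hlt
    have htok : pvTokens (cs.drop i) =
        String.ofList (cs[pvSkipA cs i]'hlt ::
            (cs.drop (pvSkipA cs i + 1)).takeWhile (fun d => d ≠ ';')) ::
          pvTokens ((cs.drop (pvSkipA cs i + 1)).dropWhile (fun d => d ≠ ';')) := by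
      rw [← pvTokens_dropSemis (cs.drop i), ← pvSkipA_drop cs i hi, hdrop, pvTokens, if_neg hchar]
    have hge2 := pvScanA_ge cs (pvSkipA cs i + 1)
    have hword : (cs.drop (pvSkipA cs i)).take (pvScanA cs (pvSkipA cs i + 1) - pvSkipA cs i) =
        cs[pvSkipA cs i]'hlt :: (cs.drop (pvSkipA cs i + 1)).takeWhile (fun d => d ≠ ';') := by
      rw [hdrop]
      have hsub : pvScanA cs (pvSkipA cs i + 1) - pvSkipA cs i =
          (pvScanA cs (pvSkipA cs i + 1) - (pvSkipA cs i + 1)) + 1 := by omega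
      rw [hsub, List.take_succ_cons, pvScanA_take cs (pvSkipA cs i + 1) (by omega)]
    have htail : cs.drop (pvScanA cs (pvSkipA cs i + 1)) =
        (cs.drop (pvSkipA cs i + 1)).dropWhile (fun d => d ≠ ';') :=
      pvScanA_drop cs (pvSkipA cs i + 1) (by omega)
    dsimp only
    split
    · rename_i hsp
      obtain ⟨hj0, hi2, hnosemi⟩ := hsp
      have hi0 : i = 0 := by omega
      have hacc' : acc = [] := hacc hi0
      subst hacc'
      subst hi0
      have htake : (cs.drop (pvSkipA cs 0 + 1)).takeWhile (fun d => d ≠ ';') =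
          cs.drop (pvSkipA cs 0 + 1) := by
        rw [List.takeWhile_eq_self_iff]
        intro c hc
        have : c ∈ cs := List.mem_of_mem_drop hc
        simp
        intro hcc
        exact hnosemi (hcc ▸ this)
      have hdropw : (cs.drop (pvSkipA cs 0 + 1)).dropWhile (fun d => d ≠ ';') = [] := by
        rw [List.dropWhile_eq_nil_iff]
        intro c hc
        have : c ∈ cs := List.mem_of_mem_drop hc
        simp
        intro hcc
        exact hnosemi (hcc ▸ this)
      rw [List.nil_append, htok, htake, hdropw]
      have : cs[pvSkipA cs 0]'hlt :: cs.drop (pvSkipA cs 0 + 1) = cs := by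
        rw [← hdrop, hj0]
        simp
      rw [this]
      simp [pvTokens]
    · rw [pvLoopA_eq cs (pvScanA cs (pvSkipA cs i + 1))
        (pvScanA_le cs (pvSkipA cs i + 1) (by omega)) _ (by omega)]
      rw [htok, hword, htail]
      simp
termination_by cs.length - i

-- ---- B computes pvTokens ----

-- what splitOn.go's accumulator pair denotes
def pvPieces : List Char → List Char → List (List Char)
  | [], cur => [cur.reverse]
  | c :: rest, cur => if c = ';' then cur.reverse :: pvPieces rest [] else pvPieces rest (c :: cur)

theorem pvGo_eq (fuel : Nat) (l cur : List Char) (acc : List (List Char)) (h : l.length ≤ fuel) :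
    PySem.Chars.splitOn.go [';'] fuel l cur acc = acc.reverse ++ pvPieces l cur := by
  induction fuel generalizing l cur acc with
  | zero =>
    have : l = [] := by
      cases l with
      | nil => rfl
      | cons c t => simp at h
    subst this
    rw [PySem.Chars.splitOn.go.eq_def]
    simp [pvPieces]
  | succ fuel ih =>
    cases l with
    | nil =>
      rw [PySem.Chars.splitOn.go.eq_def]
      simp [pvPieces]
    | cons c rest =>
      rw [PySem.Chars.splitOn.go.eq_def]
      by_cases hc : c = ';'
      · subst hc
        have hpre : List.isPrefixOf [';'] (';' :: rest) = true := by simp [List.isPrefixOf]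
        simp only [hpre, if_pos]
        rw [ih _ _ _ (by simpa using Nat.le_of_succ_le_succ h)]
        simp [pvPieces]
      · have hpre : List.isPrefixOf [';'] (c :: rest) = false := by
          simp [List.isPrefixOf]
          exact fun hh => (hc hh.symm).elim
        simp only [hpre, Bool.false_eq_true, if_neg, not_false_iff]
        rw [ih _ _ _ (by simpa using Nat.le_of_succ_le_succ h)]
        simp [pvPieces, hc]

theorem pvPieces_filter (l cur : List Char) :
    ((pvPieces l cur).map String.ofList).filter (fun t => t ≠ "") =
      (if cur.reverse ++ l.takeWhile (fun d => d ≠ ';') = [] then []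
       else [String.ofList (cur.reverse ++ l.takeWhile (fun d => d ≠ ';'))]) ++
      pvTokens (l.dropWhile (fun d => d ≠ ';')) := by
  induction l generalizing cur with
  | nil =>
    simp only [pvPieces, List.takeWhile_nil, List.dropWhile_nil, List.append_nil, pvTokens]
    by_cases hcur : cur = []
    · subst hcur; simp
    · have hr : cur.reverse ≠ [] := by simpa using hcur
      simp [hr]
  | cons c rest ih =>
    by_cases hc : c = ';'
    · subst hc
      rw [List.takeWhile_cons_of_neg (by simp), List.dropWhile_cons_of_neg (by simp)]
      simp only [pvPieces, ite_true]
      rw [pvTokens]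
      simp only [ite_true, List.append_nil]
      have hr := ih []
      simp only [List.reverse_nil, List.nil_append] at hr
      rw [List.map_cons, List.filter_cons]
      rw [hr, ← pvTokens_unfold]
      by_cases hcur : cur = []
      · subst hcur; simp
      · have hrne : cur.reverse ≠ [] := by simpa using hcur
        simp [hrne]
    · rw [List.takeWhile_cons_of_pos (by simp [hc]), List.dropWhile_cons_of_pos (by simp [hc])]
      simp only [pvPieces, if_neg hc]
      rw [ih (c :: cur)]
      have h1 : (c :: cur).reverse ++ rest.takeWhile (fun d => d ≠ ';') ≠ [] := by simp
      have h2 : cur.reverse ++ c :: rest.takeWhile (fun d => d ≠ ';') ≠ [] := by simp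
      rw [if_neg h1, if_neg h2]
      simp

theorem pvAlt_eq (row : String) : semicolon_split_alt row = pvTokens row.toList := by
  unfold semicolon_split_alt
  have hsep : (";".toList) = [';'] := rfl
  rw [hsep, PySem.Chars.splitOn]
  rw [pvGo_eq _ _ _ _ (by omega)]
  simp only [List.reverse_nil, List.nil_append]
  rw [pvPieces_filter]
  simp only [List.reverse_nil, List.nil_append]
  rw [← pvTokens_unfold]

theorem pvA_eq (row : String) : semicolon_split row = pvTokens row.toList := by
  have h := pvLoopA_eq row.toList 0 (by omega) [] (fun _ => rfl)
  simpa [semicolon_split] using h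

-- ===== VERDICT (by name: the statement is the Claim_ definition above) =====
theorem semicolon_split_spec : Claim_equal_semicolon_split := by
  intro row _
  unfold Spec_semicolon_split
  rw [pvA_eq, pvAlt_eq]
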